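-- pv_equiv track=rewrite | github.com/DMzda/adventofcode21 | day12.py | will_have_extra_small_cave_visits
-- ===== SOURCE A (Python) =====
-- from collections import defaultdict
--
-- def will_have_extra_small_cave_visits(path, small_cave):
--     smalls = [cave for cave in path if cave.islower()]
--     twos = 0
--     counts = defaultdict(int)
--     counts[small_cave] += 1
--     for cave in smalls:
--         counts[cave] += 1
--
--     return sum(count > 1 for count in counts.values()) > 1
-- ===== SOURCE B (Python) =====
-- def will_have_extra_small_cave_visits(path, small_cave):
--     caves = sorted([small_cave] + [c for c in path if c.islower()])
--     repeated = 0
--     i = 0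
--     while i < len(caves):
--         j = i + 1
--         while j < len(caves) and caves[j] == caves[i]:
--             j += 1
--         if j - i > 1:
--             repeated += 1
--             if repeated > 1:
--                 return True
--         i = j
--     return False
-- ===== Notes on version B (the rewrite author's own statement) =====
-- stated objective: alternative
-- what changed: Replaces the count-dictionary plus a second summing pass over its values by sort-then-scan: sort the small caves (with small_cave prepended) and walk the sorted list run by run, returning True as soon as a second run of length > 1 is found.
import Mathlib
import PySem

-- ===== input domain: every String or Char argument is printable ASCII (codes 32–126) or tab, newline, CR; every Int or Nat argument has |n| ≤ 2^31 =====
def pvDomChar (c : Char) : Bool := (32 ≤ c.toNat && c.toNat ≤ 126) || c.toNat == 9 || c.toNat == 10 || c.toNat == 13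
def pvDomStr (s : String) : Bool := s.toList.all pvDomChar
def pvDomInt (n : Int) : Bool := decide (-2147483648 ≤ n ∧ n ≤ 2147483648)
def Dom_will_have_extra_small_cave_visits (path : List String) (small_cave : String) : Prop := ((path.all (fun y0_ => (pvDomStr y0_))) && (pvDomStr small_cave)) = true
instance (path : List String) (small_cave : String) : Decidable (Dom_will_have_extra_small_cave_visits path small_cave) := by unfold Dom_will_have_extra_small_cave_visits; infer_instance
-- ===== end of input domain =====

-- B replaces A's count-dictionary plus summing pass over its values by sort-then-scan:
-- sort small_cave :: (lowercase caves of path) and walk the sorted list run by run,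
-- answering true as soon as a second run of length > 1 appears; proved equal on the whole domain.

-- ===== PORT A =====
-- str.islower(): some cased character and no uppercase cased one; exact on the ASCII domain
-- (the cased ASCII characters are exactly the letters, so: some lowercase letter and no uppercase letter).
def caveIslower (s : String) : Bool :=
  s.toList.any PySem.Chars.islower && !(s.toList.any PySem.Chars.isupper)

def will_have_extra_small_cave_visits (path : List String) (small_cave : String) : Bool :=
  let smalls := path.filter caveIslower
  let counts : PySem.Dict String Int := PySem.Dict.empty.modify small_cave 0 (· + 1)
  let counts := smalls.foldl (fun d cave => d.modify cave 0 (· + 1)) counts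
  decide ((counts.values.map (fun count => if count > 1 then (1 : Int) else 0)).sum > 1)

-- ===== PORT B =====
-- the outer while loop of Source B: each step consumes one maximal run of equal caves
-- (the inner while loop is the takeWhile/dropWhile split of the tail at the head cave)
def goRuns : List String → Nat → Bool
  | [], _ => false
  | x :: t, r =>
    let run := t.takeWhile (fun a => a == x)
    let rest := t.dropWhile (fun a => a == x)
    if run.length + 1 > 1 then
      if r + 1 > 1 then true else goRuns rest (r + 1)
    else goRuns rest r
termination_by l _ => l.length
decreasing_by
  all_goals exact Nat.lt_succ_of_le (t.length_dropWhile_le _)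

def will_have_extra_small_cave_visits_alt (path : List String) (small_cave : String) : Bool :=
  let caves := PySem.List.sorted (small_cave :: path.filter caveIslower) (fun x => x) false
  goRuns caves 0

-- ===== PRECONDITION & SPEC =====
def Spec_will_have_extra_small_cave_visits (path : List String) (small_cave : String) (out : Bool) : Prop := out = will_have_extra_small_cave_visits_alt path small_cave
instance (path : List String) (small_cave : String) (out : Bool) : Decidable (Spec_will_have_extra_small_cave_visits path small_cave out) := by unfold Spec_will_have_extra_small_cave_visits; infer_instance

-- ===== CLAIM (what is proved, stated in full; the proofs are below) =====
def Claim_equal_will_have_extra_small_cave_visits : Prop := ∀ (path : List String) (small_cave : String), Dom_will_have_extra_small_cave_visits path small_cave → Spec_will_have_extra_small_cave_visits path small_cave (will_have_extra_small_cave_visits path small_cave)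

-- ===== LEMMAS AND PROOFS =====

-- number of distinct caves occurring at least twice in l
def Ddup (l : List String) : Nat :=
  (l.toFinset.filter (fun y => 2 ≤ l.count y)).card

lemma Ddup_perm {l l' : List String} (h : l'.Perm l) : Ddup l' = Ddup l := by
  unfold Ddup
  rw [List.toFinset_eq_of_perm l' l h]
  congr 1
  apply Finset.filter_congr
  intro y _
  rw [h.count_eq]

-- A's 0/1-sum over the counter's values counts the distinct elements of l occurring more than once.
lemma counter_sum_eq_countP (l : List String) :
    (((PySem.Dict.counter l).values.map
      (fun count => if count > 1 then (1 : Int) else 0)).sum)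
    = ((PySem.Set.ofList l).countP (fun k => decide ((1:Int) < (l.count k : Int))) : Int) := by
  rw [PySem.Dict.values_eq_map_keys _ (PySem.Dict.nodup_keys_counter l) 0, List.map_map]
  have h := PySem.List.sum_map_ite_one_zero
    (fun k => decide ((1:Int) < (l.count k : Int))) (PySem.Set.ofList l)
  simp only [PySem.Dict.keys_counter]
  simpa [Function.comp_def, PySem.Dict.getD_counter] using h

lemma countP_ofList_eq_Ddup (l : List String) :
    (PySem.Set.ofList l).countP (fun k => decide ((1:Int) < (l.count k : Int))) = Ddup l := by
  unfold Ddup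
  rw [List.countP_eq_length_filter]
  have hnd : ((PySem.Set.ofList l).filter (fun k => decide ((1:Int) < (l.count k : Int)))).Nodup :=
    (PySem.Set.nodup_ofList l).filter _
  rw [← List.toFinset_card_of_nodup hnd]
  congr 1
  ext y
  simp only [List.mem_toFinset, List.mem_filter, Finset.mem_filter, PySem.Set.mem_ofList,
    decide_eq_true_eq]
  constructor <;> rintro ⟨h1, h2⟩ <;> exact ⟨h1, by omega⟩

-- on a sorted tail whose elements all dominate x, dropping the leading copies of x removes them all
lemma not_mem_dropWhile (x : String) (t : List String)
    (hge : ∀ y ∈ t, x ≤ y) (hp : t.Pairwise (· ≤ ·)) :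
    x ∉ t.dropWhile (fun a => a == x) := by
  induction t with
  | nil => simp
  | cons a t' ih =>
    simp only [List.dropWhile_cons]
    by_cases hax : (a == x) = true
    · rw [if_pos hax]
      have hax' : a = x := by simpa using hax
      subst hax'
      exact ih (fun y hy => (List.pairwise_cons.mp hp).1 y hy) hp.tail
    · rw [if_neg hax]
      intro hmem
      have hane : a ≠ x := by simpa using hax
      rcases List.mem_cons.mp hmem with h | h
      · exact hane h.symm
      · have h1 : x ≤ a := hge a List.mem_cons_self
        have h2 : a ≤ x := (List.pairwise_cons.mp hp).1 x h
        exact hane (le_antisymm h2 h1)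

-- run decomposition of Ddup on a sorted list
lemma Ddup_cons_sorted (x : String) (t : List String)
    (h : (x :: t).Pairwise (· ≤ ·)) :
    Ddup (x :: t) =
      (if (t.takeWhile (fun a => a == x)).length ≥ 1 then 1 else 0)
        + Ddup (t.dropWhile (fun a => a == x)) := by
  set run := t.takeWhile (fun a => a == x) with hrun
  set rest := t.dropWhile (fun a => a == x) with hrest
  have hrunx : ∀ y ∈ run, y = x := by
    intro y hy
    have := List.mem_takeWhile_imp hy
    simpa using this
  have hxrest : x ∉ rest :=
    not_mem_dropWhile x t (fun y hy => (List.pairwise_cons.mp h).1 y hy) h.tail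
  have hsplit : run ++ rest = t := List.takeWhile_append_dropWhile ..
  have hcount_run : ∀ y, run.count y = if y = x then run.length else 0 := by
    intro y
    by_cases hyx : y = x
    · subst hyx
      rw [if_pos rfl]
      exact List.count_eq_length.mpr (fun b hb => (hrunx b hb).symm)
    · rw [if_neg hyx]
      exact List.count_eq_zero.mpr (fun hmem => hyx (hrunx y hmem))
  have hcount_x : (x :: t).count x = 1 + run.length := by
    rw [List.count_cons_self, ← hsplit, List.count_append, hcount_run x, if_pos rfl,
      List.count_eq_zero.mpr hxrest]
    omega
  have hcount_ne : ∀ y, y ≠ x → (x :: t).count y = rest.count y := by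
    intro y hyx
    have h1 : (x :: t).count y = t.count y := by
      rw [List.count_cons]
      simp [Ne.symm hyx]
    rw [h1, ← hsplit, List.count_append, hcount_run y, if_neg hyx]
    omega
  have htf : (x :: t).toFinset = insert x rest.toFinset := by
    ext y
    simp only [List.mem_toFinset, List.mem_cons, Finset.mem_insert]
    constructor
    · rintro (rfl | hy)
      · exact Or.inl rfl
      · rw [← hsplit] at hy
        rcases List.mem_append.mp hy with h1 | h2
        · exact Or.inl (hrunx y h1)
        · exact Or.inr h2
    · rintro (rfl | hy)
      · exact Or.inl rfl
      · refine Or.inr ?_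
        rw [← hsplit]
        exact List.mem_append.mpr (Or.inr hy)
  have hxnot : x ∉ rest.toFinset := by simpa using hxrest
  unfold Ddup
  rw [htf, Finset.filter_insert]
  have hfilter_eq : rest.toFinset.filter (fun y => 2 ≤ (x :: t).count y)
      = rest.toFinset.filter (fun y => 2 ≤ rest.count y) := by
    apply Finset.filter_congr
    intro y hy
    have hyx : y ≠ x := fun hxy => hxnot (hxy ▸ hy)
    rw [hcount_ne y hyx]
  by_cases hr : 1 ≤ run.length
  · have hpx : 2 ≤ (x :: t).count x := by omega
    rw [if_pos hpx, if_pos hr,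
      Finset.card_insert_of_notMem (fun hmem => hxnot (Finset.mem_filter.mp hmem).1), hfilter_eq]
    omega
  · have hpx : ¬ 2 ≤ (x :: t).count x := by omega
    rw [if_neg hpx, if_neg hr, hfilter_eq]
    omega

-- B's run scan on a sorted list counts the runs of length > 1, with early exit at two
lemma goRuns_eq : ∀ (l : List String) (r : Nat), r ≤ 1 → l.Pairwise (· ≤ ·) →
    goRuns l r = decide (1 < r + Ddup l) := by
  intro l r
  induction l, r using goRuns.induct with
  | case1 r =>
    intro hr _
    simp only [goRuns, Ddup, List.toFinset_nil, Finset.filter_empty, Finset.card_empty]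
    symm
    rw [decide_eq_false_iff_not]
    omega
  | case2 x t r _run hgt hr1 =>
    intro hr h
    have hrn : _run = t.takeWhile (fun a => a == x) := rfl
    rw [hrn] at hgt
    simp only [goRuns]
    rw [if_pos hgt, if_pos hr1, Ddup_cons_sorted x t h,
      if_pos (by omega : 1 ≤ (t.takeWhile (fun a => a == x)).length)]
    symm
    rw [decide_eq_true_iff]
    omega
  | case3 x t r _run _rest hgt hnr ih =>
    intro hr h
    have hrn : _run = t.takeWhile (fun a => a == x) := rfl
    have hrs : _rest = t.dropWhile (fun a => a == x) := rfl
    rw [hrn] at hgt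
    rw [hrs] at ih
    have hrest : (t.dropWhile (fun a => a == x)).Pairwise (· ≤ ·) :=
      h.tail.sublist (t.dropWhile_sublist _)
    simp only [goRuns]
    rw [if_pos hgt, if_neg hnr, ih (by omega) hrest, Ddup_cons_sorted x t h,
      if_pos (by omega : 1 ≤ (t.takeWhile (fun a => a == x)).length), Nat.add_assoc]
  | case4 x t r _run _rest hle ih =>
    intro hr h
    have hrn : _run = t.takeWhile (fun a => a == x) := rfl
    have hrs : _rest = t.dropWhile (fun a => a == x) := rfl
    rw [hrn] at hle
    rw [hrs] at ih
    have hrest : (t.dropWhile (fun a => a == x)).Pairwise (· ≤ ·) :=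
      h.tail.sublist (t.dropWhile_sublist _)
    simp only [goRuns]
    rw [if_neg hle, ih hr hrest, Ddup_cons_sorted x t h,
      if_neg (by omega : ¬ 1 ≤ (t.takeWhile (fun a => a == x)).length), Nat.zero_add]

-- ===== VERDICT (by name: the statement is the Claim_ definition above) =====
theorem will_have_extra_small_cave_visits_spec : Claim_equal_will_have_extra_small_cave_visits := by
  intro path small_cave _
  show _ = _
  unfold will_have_extra_small_cave_visits will_have_extra_small_cave_visits_alt
  simp only []
  rw [show (path.filter caveIslower).foldl (fun d cave => d.modify cave 0 (· + 1))
        (PySem.Dict.empty.modify small_cave 0 (· + 1))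
      = PySem.Dict.counter (small_cave :: path.filter caveIslower) from rfl]
  rw [counter_sum_eq_countP, countP_ofList_eq_Ddup]
  rw [goRuns_eq _ 0 (by omega) (PySem.List.sorted_pairwise _ _)]
  rw [Ddup_perm (PySem.List.sorted_perm _ _ _)]
  simp
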